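-- pv_equiv track=rewrite | github.com/asdqweasdzxcasd/dingcorithm | 2st_week/02_14_delivery.py | is_available_to_order
-- ===== SOURCE A (Python) =====
-- def is_available_to_order(menus, orders):
--     menus.sort()
--     available = []
--     for order in orders:
--         min = 0
--         max = len(menus) - 1
--         while min <= max:
--             avg = (min + max) // 2
--             if order == menus[avg]:
--                 available.append(order)
--                 break
--             elif order < menus[avg]:
--                 max = avg - 1
--             elif order > menus[avg]:
--                 min = avg + 1
--
--
--     # 이 부분을 채워보세요!
--     return available
-- ===== SOURCE B (Python) =====
-- def is_available_to_order(menus, orders):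
--     menus.sort()  # kept: A sorts its argument in place and a caller could observe that
--     menu_set = set(menus)
--     return [order for order in orders if order in menu_set]
-- ===== Notes on version B (the rewrite author's own statement) =====
-- stated objective: faster
-- what changed: Replaces the hand-written per-order binary-search while-loop with one set built from the menus and a single comprehension doing O(1) average membership tests; the in-place sort of menus is kept for the observable mutation.
import Mathlib
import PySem

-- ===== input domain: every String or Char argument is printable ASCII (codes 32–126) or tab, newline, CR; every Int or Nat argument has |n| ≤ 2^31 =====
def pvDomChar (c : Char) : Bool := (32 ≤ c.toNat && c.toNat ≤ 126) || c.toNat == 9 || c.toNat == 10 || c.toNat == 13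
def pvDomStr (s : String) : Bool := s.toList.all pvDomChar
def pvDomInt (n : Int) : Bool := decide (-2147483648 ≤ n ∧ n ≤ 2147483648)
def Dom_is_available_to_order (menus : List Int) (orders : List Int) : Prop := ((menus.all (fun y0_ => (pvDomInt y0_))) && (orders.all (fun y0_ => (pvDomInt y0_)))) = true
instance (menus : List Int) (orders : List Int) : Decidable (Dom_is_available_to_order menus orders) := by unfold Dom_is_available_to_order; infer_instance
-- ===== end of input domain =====

-- B replaces A's per-order binary search with one set of the menus and a membership
-- filter; equivalence is about the RETURN value (both sort `menus` in place in Python).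

-- ===== PORT A =====
-- the `while min <= max` binary-search loop of A (returns whether `order` was found)
def pvBSearch (menus : List Int) (order : Int) (lo hi : Int) : Bool :=
  if _h : lo ≤ hi then
    let avg := PySem.Int.floordiv (lo + hi) 2
    match PySem.List.pyGet? menus avg with
    | none => false   -- Python IndexError; unreachable for 0 ≤ lo, hi < len
    | some v =>
      if order = v then true
      else if order < v then pvBSearch menus order lo (avg - 1)
      else pvBSearch menus order (avg + 1) hi
  else false
termination_by (hi + 1 - lo).toNat
decreasing_by
  · have := PySem.Int.floordiv_two_mid_bounds (lo := lo) (hi := hi) _h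
    omega
  · have := PySem.Int.floordiv_two_mid_bounds (lo := lo) (hi := hi) _h
    omega

def is_available_to_order (menus : List Int) (orders : List Int) : List Int :=
  let ms := PySem.List.sorted menus (fun x => x) false
  orders.foldl
    (fun available order =>
      if pvBSearch ms order 0 ((ms.length : Int) - 1) then available ++ [order]
      else available)
    []

-- ===== PORT B =====
def is_available_to_order_alt (menus : List Int) (orders : List Int) : List Int :=
  let ms := PySem.List.sorted menus (fun x => x) false
  let menuSet : PySem.Set Int := PySem.Set.ofList ms
  orders.filter (fun order => PySem.Set.contains menuSet order)

-- ===== PRECONDITION & SPEC =====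
def Spec_is_available_to_order (menus : List Int) (orders : List Int) (out : List Int) : Prop := out = is_available_to_order_alt menus orders
instance (menus : List Int) (orders : List Int) (out : List Int) : Decidable (Spec_is_available_to_order menus orders out) := by unfold Spec_is_available_to_order; infer_instance

-- ===== CLAIM (what is proved, stated in full; the proofs are below) =====
def Claim_equal_is_available_to_order : Prop := ∀ (menus : List Int) (orders : List Int), Dom_is_available_to_order menus orders → Spec_is_available_to_order menus orders (is_available_to_order menus orders)

-- ===== LEMMAS AND PROOFS =====

-- sorted list: getElem is monotone
theorem pvSorted_getElem_le (ms : List Int) (hs : ms.Pairwise (· ≤ ·))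
    {i j : Nat} (hij : i ≤ j) (hj : j < ms.length) : ms[i] ≤ ms[j] := by
  rcases Nat.lt_or_eq_of_le hij with h | h
  · exact (List.pairwise_iff_getElem.mp hs) i j (by omega) hj h
  · subst h; exact le_refl _

-- correctness of A's binary-search loop on a sorted segment
theorem pvBSearch_iff (ms : List Int) (hs : ms.Pairwise (· ≤ ·)) (x : Int) :
    ∀ (n : Nat) (lo hi : Int), (hi + 1 - lo).toNat ≤ n → 0 ≤ lo → hi < (ms.length : Int) →
      (pvBSearch ms x lo hi = true ↔
        ∃ i : Nat, lo ≤ (i : Int) ∧ (i : Int) ≤ hi ∧ ∃ h : i < ms.length, ms[i] = x) := by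
  intro n
  induction n with
  | zero =>
    intro lo hi hn hlo hhi
    have hlt : hi < lo := by omega
    rw [pvBSearch, dif_neg (by omega)]
    simp only [Bool.false_eq_true, false_iff]
    rintro ⟨i, h1, h2, _, _⟩; omega
  | succ n ih =>
    intro lo hi hn hlo hhi
    by_cases hle : lo ≤ hi
    · have hb := PySem.Int.floordiv_two_mid_bounds (lo := lo) (hi := hi) hle
      set avg := PySem.Int.floordiv (lo + hi) 2 with havgdef
      have havg : 0 ≤ avg ∧ avg < (ms.length : Int) := by omega
      have hltm : avg.toNat < ms.length := by omega
      have hget : PySem.List.pyGet? ms avg = some ms[avg.toNat] := by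
        rw [PySem.List.pyGet?_of_nonneg ms havg.1, List.getElem?_eq_getElem hltm]
      rw [pvBSearch, dif_pos hle]
      simp only [← havgdef, hget]
      by_cases hxv : x = ms[avg.toNat]
      · simp only [if_pos hxv, true_iff]
        exact ⟨avg.toNat, by omega, by omega, hltm, hxv.symm⟩
      · rw [if_neg hxv]
        by_cases hlt : x < ms[avg.toNat]
        · rw [if_pos hlt, ih lo (avg - 1) (by omega) hlo (by omega)]
          constructor
          · rintro ⟨i, h1, h2, h3, h4⟩; exact ⟨i, h1, by omega, h3, h4⟩
          · rintro ⟨i, h1, h2, h3, h4⟩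
            refine ⟨i, h1, ?_, h3, h4⟩
            by_contra hc
            have hge : avg.toNat ≤ i := by omega
            have := pvSorted_getElem_le ms hs hge h3
            rw [h4] at this
            omega
        · rw [if_neg hlt, ih (avg + 1) hi (by omega) (by omega) hhi]
          constructor
          · rintro ⟨i, h1, h2, h3, h4⟩; exact ⟨i, by omega, h2, h3, h4⟩
          · rintro ⟨i, h1, h2, h3, h4⟩
            refine ⟨i, ?_, h2, h3, h4⟩
            by_contra hc
            have hle' : i ≤ avg.toNat := by omega
            have := pvSorted_getElem_le ms hs hle' hltm
            rw [h4] at this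
            omega
    · rw [pvBSearch, dif_neg hle]
      simp only [Bool.false_eq_true, false_iff]
      rintro ⟨i, h1, h2, _, _⟩; omega

-- on the whole list: A's binary search decides membership
theorem pvBSearch_mem (ms : List Int) (hs : ms.Pairwise (· ≤ ·)) (x : Int) :
    pvBSearch ms x 0 ((ms.length : Int) - 1) = true ↔ x ∈ ms := by
  rw [pvBSearch_iff ms hs x (ms.length) 0 ((ms.length : Int) - 1) (by omega) (by omega) (by omega)]
  constructor
  · rintro ⟨i, _, _, h3, h4⟩; exact h4 ▸ List.getElem_mem h3
  · intro hx
    obtain ⟨i, hi, hget⟩ := List.mem_iff_getElem.mp hx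
    exact ⟨i, by omega, by omega, hi, hget⟩

-- A's append-accumulator loop is a filter
theorem pvFoldl_filter (p : Int → Bool) (l acc : List Int) :
    l.foldl (fun a x => if p x then a ++ [x] else a) acc = acc ++ l.filter p := by
  induction l generalizing acc with
  | nil => simp
  | cons y ys ih =>
    by_cases h : p y <;> simp [List.foldl_cons, h, ih]

-- ===== VERDICT (by name: the statement is the Claim_ definition above) =====
theorem is_available_to_order_spec : Claim_equal_is_available_to_order := by
  intro menus orders _
  unfold Spec_is_available_to_order is_available_to_order is_available_to_order_alt
  simp only [pvFoldl_filter, List.nil_append]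
  apply List.filter_congr
  intro x _
  have hs : (PySem.List.sorted menus (fun x => x) false).Pairwise (· ≤ ·) :=
    PySem.List.sorted_pairwise menus (fun x => x)
  have h1 := pvBSearch_mem (PySem.List.sorted menus (fun x => x) false) hs x
  rw [PySem.List.length_sorted] at h1
  rw [Bool.eq_iff_iff]
  simp [h1, PySem.List.mem_sorted, PySem.Set.mem_ofList]
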